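-- pv_equiv track=rewrite | github.com/CrowbarInc/AI-DM-Ashen-Thrones- | game/intent_parser.py | _declared_travel_local_prefix_before_match
-- ===== SOURCE A (Python) =====
-- def _declared_travel_local_prefix_before_match(declared: str, match_start: int) -> str:
--     """Clause/sentence tail immediately before a travel match (avoids skipping real movement after a prior question)."""
--     prefix = declared[:match_start] if match_start > 0 else ""
--     if not isinstance(prefix, str) or not prefix.strip():
--         return ""
--     cut = -1
--     for sep in (".", "!", "?", ";", ",", "\n", "\u2014", "\u2013"):  # clause / em dash / en dash
--         idx = prefix.rfind(sep)
--         if idx > cut: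
--             cut = idx
--     tail = prefix[cut + 1 :].strip() if cut >= 0 else prefix.strip()
--     return tail.lstrip(" \t\"'«»").strip()
-- ===== SOURCE B (Python) =====
-- _SEPS = set(".!?;,\n\u2014\u2013")
--
--
-- def _declared_travel_local_prefix_before_match(declared: str, match_start: int) -> str:
--     """Clause/sentence tail immediately before a travel match (single backward scan)."""
--     prefix = declared[:match_start] if match_start > 0 else ""
--     if not prefix.strip():
--         return ""
--     tail = prefix
--     for i in range(len(prefix) - 1, -1, -1):
--         if prefix[i] in _SEPS:
--             tail = prefix[i + 1 :]
--             break
--     return tail.strip().lstrip(" \t\"'«»").strip()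
-- ===== Notes on version B (the rewrite author's own statement) =====
-- stated objective: simpler
-- what changed: A computes the cut by running rfind over the whole prefix once per each of the eight separator strings and keeping a running maximum; B makes a single backward scan over the prefix and takes the tail after the first separator character it meets, with no cut variable at all.
import Mathlib
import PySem

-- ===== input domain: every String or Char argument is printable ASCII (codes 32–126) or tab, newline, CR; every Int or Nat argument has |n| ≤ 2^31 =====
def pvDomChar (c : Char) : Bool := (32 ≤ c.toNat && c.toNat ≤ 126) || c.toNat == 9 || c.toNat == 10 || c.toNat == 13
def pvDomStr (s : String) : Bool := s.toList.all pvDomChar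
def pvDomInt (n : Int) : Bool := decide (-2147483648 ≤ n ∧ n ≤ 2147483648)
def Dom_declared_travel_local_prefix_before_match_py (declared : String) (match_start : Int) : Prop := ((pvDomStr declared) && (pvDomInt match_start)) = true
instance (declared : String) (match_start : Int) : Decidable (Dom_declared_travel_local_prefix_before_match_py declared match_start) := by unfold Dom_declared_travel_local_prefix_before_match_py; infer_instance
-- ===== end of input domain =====

-- B replaces A's eight whole-prefix rfind passes by one backward scan that stops at the
-- first (= rightmost) separator character; objective: simpler (one pass, no running max).

-- shared primitive, used by both ports: Python's s.lstrip(chars) (PySem provides strip(chars)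
-- but not the left-only form); exact: drops the leading code points that occur in chars.
def pyLstripChars (s chars : String) : String :=
  String.ofList (s.toList.dropWhile (fun c => chars.toList.contains c))

-- ===== PORT A =====
def declared_travel_local_prefix_before_match_py (declared : String) (match_start : Int) : String :=
  let pre := if match_start > 0 then PySem.Str.slice declared none (some match_start) else ""
  if PySem.Str.strip pre = "" then ""
  else
    let cut := ([".", "!", "?", ";", ",", "\n", "\u2014", "\u2013"] : List String).foldl
      (fun cut sep =>
        let idx := PySem.Str.rfind pre sep
        if cut < idx then idx else cut) (-1)
    let tail := if cut ≥ 0 then PySem.Str.strip (PySem.Str.slice pre (some (cut + 1)) none)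
      else PySem.Str.strip pre
    PySem.Str.strip (pyLstripChars tail " \t\"'«»")

-- ===== PORT B =====
-- B's separator set _SEPS (8 distinct characters)
def sepSet : List Char := ['.', '!', '?', ';', ',', '\n', '\u2014', '\u2013']

-- the backward loop 'for i in range(len(prefix)-1, -1, -1): if prefix[i] in _SEPS: tail = prefix[i+1:]; break'
def bTail (cs : List Char) : Nat → List Char
  | 0 => cs
  | n + 1 => if sepSet.contains (cs.getD n ' ') then cs.drop (n + 1) else bTail cs n

def declared_travel_local_prefix_before_match_py_alt (declared : String) (match_start : Int) : String :=
  let pre := if match_start > 0 then PySem.Str.slice declared none (some match_start) else ""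
  if PySem.Str.strip pre = "" then ""
  else
    let tail := String.ofList (bTail pre.toList pre.toList.length)
    PySem.Str.strip (pyLstripChars (PySem.Str.strip tail) " \t\"'«»")

-- ===== PRECONDITION & SPEC =====
def Spec_declared_travel_local_prefix_before_match_py (declared : String) (match_start : Int) (out : String) : Prop := out = declared_travel_local_prefix_before_match_py_alt declared match_start
instance (declared : String) (match_start : Int) (out : String) : Decidable (Spec_declared_travel_local_prefix_before_match_py declared match_start out) := by unfold Spec_declared_travel_local_prefix_before_match_py; infer_instance

-- ===== CLAIM (what is proved, stated in full; the proofs are below) =====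
def Claim_equal_declared_travel_local_prefix_before_match_py : Prop := ∀ (declared : String) (match_start : Int), Dom_declared_travel_local_prefix_before_match_py declared match_start → Spec_declared_travel_local_prefix_before_match_py declared match_start (declared_travel_local_prefix_before_match_py declared match_start)

-- ===== LEMMAS AND PROOFS =====

-- proof-side spec: the largest index j < n with P cs[j], as an Int (-1 if none)
def specCut (P : Char → Bool) (cs : List Char) : Nat → Int
  | 0 => -1
  | n + 1 => if (cs[n]?.elim false P) then (n : Int) else specCut P cs n

theorem specCut_le (P : Char → Bool) (cs : List Char) (n : Nat) :
    specCut P cs n ≤ (n : Int) - 1 := by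
  induction n with
  | zero => simp [specCut]
  | succ m ih => unfold specCut; split <;> push_cast <;> omega

theorem neg_one_le_specCut (P : Char → Bool) (cs : List Char) (n : Nat) :
    -1 ≤ specCut P cs n := by
  induction n with
  | zero => simp [specCut]
  | succ m ih =>
      unfold specCut; split
      · omega
      · exact ih

theorem isPrefixOf_single (c : Char) (xs : List Char) :
    [c].isPrefixOf xs = xs[0]?.elim false (fun x => x == c) := by
  cases xs <;> simp [List.isPrefixOf, BEq.comm]

theorem rfind_go_eq (c : Char) (cs : List Char) (n : Nat) :
    PySem.Chars.rfind.go cs [c] n = specCut (fun x => x == c) cs (n + 1) := by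
  induction n with
  | zero =>
      simp only [PySem.Chars.rfind.go, specCut, isPrefixOf_single]
      rfl
  | succ m ih =>
      simp only [PySem.Chars.rfind.go, specCut, ih, isPrefixOf_single]
      rw [show ((m + 1 : Nat) : Int) = ((m : Int) + 1) by push_cast; ring]
      congr 1
      cases h : cs[m + 1]? <;> simp [List.getElem?_drop] at h ⊢ <;> simp [h]

theorem specCut_top (P : Char → Bool) (cs : List Char) :
    specCut P cs (cs.length + 1) = specCut P cs cs.length := by
  conv_lhs => rw [specCut]
  simp

theorem rfind_eq_specCut (c : Char) (cs : List Char) :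
    PySem.Chars.rfind cs [c] = specCut (fun x => x == c) cs cs.length := by
  unfold PySem.Chars.rfind
  rw [rfind_go_eq, specCut_top]

theorem specCut_or (P Q : Char → Bool) (cs : List Char) (n : Nat) :
    (if specCut P cs n < specCut Q cs n then specCut Q cs n else specCut P cs n)
      = specCut (fun c => P c || Q c) cs n := by
  induction n with
  | zero => simp [specCut]
  | succ m ih =>
      have hP := specCut_le P cs m
      have hQ := specCut_le Q cs m
      unfold specCut
      cases h : cs[m]? with
      | none => simpa using ih
      | some a =>
        simp only [Option.elim]
        by_cases hp : P a <;> by_cases hq : Q a <;>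
          simp [hp, hq, ih] <;> omega

theorem specCut_congr (P Q : Char → Bool) (h : ∀ c, P c = Q c) (cs : List Char) (n : Nat) :
    specCut P cs n = specCut Q cs n := by
  induction n with
  | zero => rfl
  | succ m ih =>
      unfold specCut
      cases hm : cs[m]? <;> simp [h, ih]

theorem specCut_false (cs : List Char) (n : Nat) :
    specCut (fun _ => false) cs n = -1 := by
  induction n with
  | zero => rfl
  | succ m ih => unfold specCut; cases hm : cs[m]? <;> simp [ih]

theorem bTail_eq (cs : List Char) (n : Nat) :
    bTail cs n = cs.drop (specCut (fun c => sepSet.contains c) cs n + 1).toNat := by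
  induction n with
  | zero => simp [bTail, specCut]
  | succ m ih =>
      have hd : sepSet.contains (cs.getD m ' ') = cs[m]?.elim false (fun c => sepSet.contains c) := by
        cases hm : cs[m]? with
        | none => simp [List.getD_eq_getElem?_getD, hm, sepSet]
        | some a => simp [List.getD_eq_getElem?_getD, hm]
      unfold bTail specCut
      rw [hd]
      cases hm : cs[m]?.elim false (fun c => sepSet.contains c) with
      | true =>
          have h1 : ((m : Int) + 1).toNat = m + 1 := by omega
          simp [h1]
      | false => simpa using ih

-- A's eight-rfind running maximum equals the backward-scan cut
theorem cutA_eq (cs : List Char) :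
    (([".", "!", "?", ";", ",", "\n", "\u2014", "\u2013"] : List String).foldl
      (fun cut sep =>
        let idx := PySem.Chars.rfind cs sep.toList
        if cut < idx then idx else cut) (-1))
      = specCut (fun c => sepSet.contains c) cs cs.length := by
  simp only [List.foldl_cons, List.foldl_nil]
  rw [show ("." : String).toList = ['.'] from rfl,
      show ("!" : String).toList = ['!'] from rfl,
      show ("?" : String).toList = ['?'] from rfl,
      show (";" : String).toList = [';'] from rfl,
      show ("," : String).toList = [','] from rfl,
      show ("\n" : String).toList = ['\n'] from rfl,
      show ("\u2014" : String).toList = ['\u2014'] from rfl,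
      show ("\u2013" : String).toList = ['\u2013'] from rfl]
  simp only [rfind_eq_specCut]
  rw [show (-1 : Int) = specCut (fun _ => false) cs cs.length from (specCut_false cs cs.length).symm]
  rw [specCut_or, specCut_or, specCut_or, specCut_or, specCut_or, specCut_or, specCut_or, specCut_or]
  exact specCut_congr _ _ (by intro c; simp only [sepSet, List.contains_cons, List.contains_nil, Bool.or_false, Bool.false_or, Bool.or_assoc]) cs cs.length

-- ===== VERDICT (by name: the statement is the Claim_ definition above) =====
theorem declared_travel_local_prefix_before_match_py_spec : Claim_equal_declared_travel_local_prefix_before_match_py := by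
  intro declared match_start _
  unfold Spec_declared_travel_local_prefix_before_match_py
  unfold declared_travel_local_prefix_before_match_py declared_travel_local_prefix_before_match_py_alt
  set pre := if match_start > 0 then PySem.Str.slice declared none (some match_start) else "" with hpre
  by_cases hs : PySem.Str.strip pre = ""
  · simp [hs]
  · rw [if_neg hs, if_neg hs]
    simp only [PySem.Str.rfind]
    rw [cutA_eq pre.toList, bTail_eq pre.toList pre.toList.length]
    set k := specCut (fun c => sepSet.contains c) pre.toList pre.toList.length with hk
    have hk1 : -1 ≤ k := neg_one_le_specCut _ _ _
    by_cases hk0 : k ≥ 0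
    · have hsl : PySem.Str.slice pre (some (k + 1)) none
          = String.ofList (pre.toList.drop (k + 1).toNat) := by
        unfold PySem.Str.slice
        congr 1
        rw [PySem.Chars.slice_eq_listSlice]
        exact PySem.List.slice_from _ (by omega)
      rw [if_pos hk0, hsl]
    · have hke : k = -1 := by omega
      rw [if_neg hk0, hke]
      norm_num
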